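-- pv_equiv track=rewrite | github.com/angushay42/EOT | order_package/utils.py | level_cost
-- ===== SOURCE A (Python) =====
-- def level_cost(vals: list[int]) -> dict:
--     '''
--     Returns the cost of a level-order list of enchantments, excluding the sum of penalties
--     (decremented)
--     Returns the frequency of additions for an enchantment tree as a dictionary.
--     '''
--     size = len(vals)
--     hmp = {}
--     # We start from 1 to avoid adding a 0 (base item gets added 0 times)
--     # We loop until size + 1 to offset the base item.
--     for i in range(1,size+1):
--         count = 0
--         n = i
--         # Loop to count flips of 1 to 0.
--         while n > 0:
--             n = n&(n-1)
--             count += 1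
--         # Avoid KeyError.
--         if not count in hmp:
--             hmp[count] = 0
--         hmp[count] += 1
--     total = 0
--
--     i = 0 # Increment through sorted(non-increasing) enchantments
--     for key, value in hmp.items():
--         while value > 0: # Values represent the count of enchantments that get added key times.
--             total += vals[i] * key
--             i += 1
--             value -= 1 # Decrement while loop
--     return total
-- ===== SOURCE B (Python) =====
-- def level_cost(vals: list[int]) -> dict:
--     counts = sorted(i.bit_count() for i in range(1, len(vals) + 1))
--     return sum(v * c for v, c in zip(vals, counts))
-- ===== Notes on version B (the rewrite author's own statement) =====
-- stated objective: simpler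
-- what changed: Replaces the hand-rolled n&(n-1) popcount loop, the frequency dict and the nested expand-while over dict items by one line: zip vals with the sorted list of bit_counts of 1..len(vals) and sum the products.
import Mathlib
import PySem

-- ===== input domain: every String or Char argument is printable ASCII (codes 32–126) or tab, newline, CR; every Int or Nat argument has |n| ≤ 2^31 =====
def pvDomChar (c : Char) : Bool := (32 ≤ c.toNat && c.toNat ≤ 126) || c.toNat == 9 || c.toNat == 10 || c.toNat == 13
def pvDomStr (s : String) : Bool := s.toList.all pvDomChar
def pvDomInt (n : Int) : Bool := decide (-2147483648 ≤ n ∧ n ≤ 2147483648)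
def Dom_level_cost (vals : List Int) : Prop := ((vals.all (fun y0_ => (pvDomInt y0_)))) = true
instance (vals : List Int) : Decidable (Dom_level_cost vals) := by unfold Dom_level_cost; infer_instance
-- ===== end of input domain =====

-- B replaces A's hand-rolled popcount loop + frequency dict + nested expand-while by
-- zipping vals with the sorted bit_counts of 1..len(vals) (objective: simpler).

-- ===== PORT A =====
-- A's inner popcount loop: 'while n > 0: n = n & (n-1); count += 1'
def pvPopLoop (n : Int) (count : Int) : Int :=
  if h : 0 < n then pvPopLoop (PySem.Int.band n (n - 1)) (count + 1) else count
termination_by n.toNat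
decreasing_by
  rw [PySem.Int.band_of_nonneg (by omega) (by omega)]
  have hb : n.toNat &&& (n - 1).toNat ≤ (n - 1).toNat := Nat.and_le_right
  omega

-- A's expansion loop: 'while value > 0: total += vals[i]*key; i += 1; value -= 1'
-- vals[i] is ported with pyGetD (the index is provably in range whenever A runs this loop).
def pvAddLoop (vals : List Int) (key value total i : Int) : Int × Int :=
  if h : 0 < value then
    pvAddLoop vals key (value - 1) (total + (PySem.List.pyGetD vals i 0) * key) (i + 1)
  else (total, i)
termination_by value.toNat
decreasing_by omega

def level_cost (vals : List Int) : Int :=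
  let size : Int := (vals.length : Int)
  let hmp : PySem.Dict Int Int :=
    (PySem.List.pyRange 1 (size + 1) 1).foldl
      (fun hmp i =>
        let count := pvPopLoop i 0
        let hmp := if hmp.contains count = false then hmp.insert count 0 else hmp
        hmp.modify count 0 (· + 1))
      PySem.Dict.empty
  let r := hmp.items.foldl (fun (ti : Int × Int) kv => pvAddLoop vals kv.1 kv.2 ti.1 ti.2) (0, 0)
  r.1

-- ===== PORT B =====
def level_cost_alt (vals : List Int) : Int :=
  let counts : List Int :=
    PySem.List.sorted
      ((PySem.List.pyRange 1 ((vals.length : Int) + 1) 1).map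
        (fun i => (PySem.Int.bitCount i : Int)))
      (fun x => x) false
  (vals.zip counts).foldl (fun acc vc => acc + vc.1 * vc.2) 0

-- ===== PRECONDITION & SPEC =====
def Spec_level_cost (vals : List Int) (out : Int) : Prop := out = level_cost_alt vals
instance (vals : List Int) (out : Int) : Decidable (Spec_level_cost vals out) := by unfold Spec_level_cost; infer_instance

-- ===== CLAIM (what is proved, stated in full; the proofs are below) =====
def Claim_equal_level_cost : Prop := ∀ (vals : List Int), Dom_level_cost vals → Spec_level_cost vals (level_cost vals)

-- ===== LEMMAS AND PROOFS =====

theorem pvE1 (k : Nat) : (2*k+1) &&& (2*k) = 2*k := by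
  apply Nat.eq_of_testBit_eq
  intro i
  simp only [Nat.testBit_and]
  cases i with
  | zero => simp [Nat.testBit_zero]
  | succ j =>
    have h1 : (2*k+1)/2 = k := by omega
    have h2 : (2*k)/2 = k := by omega
    simp [Nat.testBit_succ, h1, h2]

theorem pvE2 (k : Nat) (hk : 0 < k) : (2*k) &&& (2*k-1) = 2*(k &&& (k-1)) := by
  apply Nat.eq_of_testBit_eq
  intro i
  cases i with
  | zero =>
    simp only [Nat.testBit_zero]
    have h1 : (2*k) % 2 = 0 := by omega
    have h2 : (2*(k &&& (k-1))) % 2 = 0 := by omega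
    simp [h1, h2]
  | succ j =>
    rw [Nat.testBit_and]
    simp only [Nat.testBit_succ]
    have h1 : (2*k)/2 = k := by omega
    have h2 : (2*k-1)/2 = k-1 := by omega
    have h3 : (2*(k &&& (k-1)))/2 = k &&& (k-1) := by omega
    rw [h1, h2, h3, Nat.testBit_and]

theorem pvBcDouble (a : Nat) : PySem.Int.bitCount ((2*a : Nat) : Int) = PySem.Int.bitCount (a : Int) := by
  rcases Nat.eq_zero_or_pos a with h | h
  · subst h; simp
  · rw [PySem.Int.bitCount_natCast (by omega)]
    have h1 : (2*a) % 2 = 0 := by omega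
    have h2 : (2*a)/2 = a := by omega
    rw [h1, h2]; simp

theorem pvBcPos (m : Nat) (hm : 0 < m) : 1 ≤ PySem.Int.bitCount (m : Int) := by
  induction m using Nat.strong_induction_on with
  | _ m ih =>
    rw [PySem.Int.bitCount_natCast hm]
    rcases Nat.even_or_odd m with he | ho
    · have h0 : m % 2 = 0 := by rcases he with ⟨r, hr⟩; omega
      have h2 : 0 < m / 2 := by omega
      have := ih (m/2) (by omega) h2
      omega
    · have h0 : m % 2 = 1 := by rcases ho with ⟨r, hr⟩; omega
      omega

theorem pvKB (m : Nat) (hm : 0 < m) :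
    PySem.Int.bitCount (((m &&& (m-1)) : Nat) : Int) + 1 = PySem.Int.bitCount (m : Int) := by
  induction m using Nat.strong_induction_on with
  | _ m ih =>
    rcases Nat.even_or_odd m with he | ho
    · obtain ⟨r, hr⟩ := he
      have hm2 : m = 2*r := by omega
      have hrpos : 0 < r := by omega
      subst hm2
      rw [pvE2 r hrpos, pvBcDouble, pvBcDouble]
      exact ih r (by omega) hrpos
    · obtain ⟨k, hk⟩ := ho
      subst hk
      have h1 : 2*k+1-1 = 2*k := by omega
      rw [h1, pvE1 k, pvBcDouble]
      rw [PySem.Int.bitCount_natCast (m := 2*k+1) (by omega)]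
      have h0 : (2*k+1) % 2 = 1 := by omega
      have h2 : (2*k+1)/2 = k := by omega
      rw [h0, h2]; omega

theorem pvPowBcLe (m : Nat) : 2 ^ (PySem.Int.bitCount (m : Int)) ≤ m + 1 := by
  induction m using Nat.strong_induction_on with
  | _ m ih =>
    rcases Nat.eq_zero_or_pos m with h | h
    · subst h; simp
    · rw [PySem.Int.bitCount_natCast h]
      have hrec := ih (m/2) (by omega)
      rcases Nat.even_or_odd m with he | ho
      · have h0 : m % 2 = 0 := by rcases he with ⟨r, hr⟩; omega
        rw [h0, Nat.zero_add]
        omega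
      · have h0 : m % 2 = 1 := by rcases ho with ⟨r, hr⟩; omega
        rw [h0, pow_add, pow_one]
        generalize hX : (2:Nat) ^ (PySem.Int.bitCount ((m/2 : Nat) : Int)) = X at hrec ⊢
        omega

theorem pvBcPowSubOne (k : Nat) : PySem.Int.bitCount (((2^k - 1 : Nat)) : Int) = k := by
  induction k with
  | zero => simp
  | succ j ih =>
    have hj : 0 < 2^j := Nat.pow_pos (by omega)
    have hpos : 0 < 2^(j+1) - 1 := by
      have : 2^(j+1) = 2 * 2^j := by ring
      omega
    rw [PySem.Int.bitCount_natCast hpos]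
    have he : 2^(j+1) = 2 * 2^j := by ring
    have h2 : (2^(j+1) - 1) / 2 = 2^j - 1 := by omega
    have h1 : (2^(j+1) - 1) % 2 = 1 := by omega
    rw [h1, h2, ih]; omega

theorem pvPopLoop_eq (m : Nat) : ∀ c : Int, pvPopLoop (m : Int) c = c + (PySem.Int.bitCount (m : Int) : Int) := by
  induction m using Nat.strong_induction_on with
  | _ m ih =>
    intro c
    rcases Nat.eq_zero_or_pos m with h | h
    · subst h; rw [pvPopLoop]; simp
    · rw [pvPopLoop]
      have hpos : (0:Int) < (m:Int) := by omega
      rw [dif_pos hpos]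
      have hc : ((m:Int)) - 1 = ((m - 1 : Nat) : Int) := by omega
      rw [hc, PySem.Int.band_natCast]
      have hlt : m &&& (m-1) < m := by
        have hb : m &&& (m-1) ≤ (m-1) := Nat.and_le_right
        omega
      rw [ih _ hlt]
      have := pvKB m h
      omega

def pvPops (n : Nat) : List Int :=
  (PySem.List.pyRange 1 ((n : Int) + 1) 1).map (fun i => (PySem.Int.bitCount i : Int))

theorem pvPops_succ (n : Nat) :
    pvPops (n+1) = pvPops n ++ [(PySem.Int.bitCount (((n+1 : Nat)) : Int) : Int)] := by
  unfold pvPops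
  have hcast : (((n+1 : Nat)) : Int) + 1 = ((n : Int) + 1) + 1 := by push_cast; ring
  rw [hcast, PySem.List.pyRange_one_succ_right (by omega), List.map_append]
  push_cast
  rfl

-- the fresh-key branch is redundant: A's dict update step IS a counter step
theorem pvStep_eq (d : PySem.Dict Int Int) (x : Int) :
    (if d.contains x = false then d.insert x 0 else d).modify x 0 (· + 1)
      = d.modify x 0 (· + 1) := by
  by_cases h : d.contains x = false
  · rw [if_pos h]
    show (d.insert x 0).modify x 0 (· + 1) = _
    unfold PySem.Dict.modify
    rw [PySem.Dict.getD_insert_self, PySem.Dict.insert_insert_self,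
        PySem.Dict.getD_of_not_contains d 0 h]
  · rw [if_neg h]

-- the running maximum popcount over 1..n
def pvM : Nat → Nat
  | 0 => 0
  | n+1 => max (pvM n) (PySem.Int.bitCount (((n+1 : Nat)) : Int))

theorem pvBcLe (n m : Nat) (h1 : 1 ≤ m) (h2 : m ≤ n) :
    PySem.Int.bitCount ((m : Nat) : Int) ≤ pvM n := by
  induction n with
  | zero => omega
  | succ j ih =>
    rcases Nat.eq_or_lt_of_le h2 with he | hl
    · subst he; exact le_max_right _ _
    · exact le_trans (ih (by omega)) (le_max_left _ _)

theorem pvF2 (n : Nat) : PySem.Int.bitCount (((n+1 : Nat)) : Int) ≤ pvM n + 1 := by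
  set p := PySem.Int.bitCount (((n+1 : Nat)) : Int) with hp
  rcases Nat.lt_or_ge p 2 with h | h
  · omega
  · have hpow := pvPowBcLe (n+1)
    rw [← hp] at hpow
    -- witness m = 2^(p-1) - 1 has popcount p-1 and lies in [1, n]
    have hm : PySem.Int.bitCount (((2^(p-1) - 1 : Nat)) : Int) = p - 1 := pvBcPowSubOne (p-1)
    have hx : 2 * 2^(p-1) = 2^p := by
      rw [← pow_succ']
      congr 1
      omega
    have hple : 2^(p-1) ≥ 2 := by
      calc 2^(p-1) ≥ 2^1 := Nat.pow_le_pow_right (by omega) (by omega)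
      _ = 2 := by norm_num
    have hle : 2^(p-1) - 1 ≤ n := by omega
    have := pvBcLe n (2^(p-1) - 1) (by omega) hle
    omega

theorem pvSet (n : Nat) :
    PySem.Set.ofList (pvPops n) = List.map (fun k : Nat => (k : Int)) (List.range' 1 (pvM n)) := by
  induction n with
  | zero =>
    show PySem.Set.ofList ((PySem.List.pyRange 1 1 1).map _) = _
    rw [PySem.List.pyRange_one_eq_nil (by omega)]
    rfl
  | succ j ih =>
    rw [pvPops_succ, PySem.Set.ofList_append_singleton, ih, PySem.Set.add_eq_ite]
    have hb1 : 1 ≤ PySem.Int.bitCount (((j+1 : Nat)) : Int) := pvBcPos (j+1) (by omega)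
    have hb2 : PySem.Int.bitCount (((j+1 : Nat)) : Int) ≤ pvM j + 1 := pvF2 j
    by_cases hc : PySem.Int.bitCount (((j+1 : Nat)) : Int) ≤ pvM j
    · have hmem : ((PySem.Int.bitCount (((j+1 : Nat)) : Int) : Nat) : Int)
          ∈ List.map (fun k : Nat => (k : Int)) (List.range' 1 (pvM j)) := by
        apply List.mem_map_of_mem
        rw [List.mem_range'_1]
        omega
      rw [if_pos hmem]
      have hM : pvM (j+1) = pvM j := by
        show max (pvM j) _ = pvM j
        omega
      rw [hM]
    · have hnmem : ¬ ((PySem.Int.bitCount (((j+1 : Nat)) : Int) : Nat) : Int)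
          ∈ List.map (fun k : Nat => (k : Int)) (List.range' 1 (pvM j)) := by
        intro hmem
        obtain ⟨k, hk, he⟩ := List.mem_map.mp hmem
        rw [List.mem_range'_1] at hk
        omega
      rw [if_neg hnmem]
      have hM : pvM (j+1) = pvM j + 1 := by
        show max (pvM j) _ = pvM j + 1
        omega
      have hbc : PySem.Int.bitCount (((j+1 : Nat)) : Int) = pvM j + 1 := by omega
      have h11 : (1 + 1 * pvM j : Nat) = pvM j + 1 := by omega
      rw [hM, List.range'_concat, List.map_append, hbc, h11]
      rfl

theorem pvDict (n : Nat) :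
    (PySem.List.pyRange 1 ((n : Int) + 1) 1).foldl
      (fun hmp i =>
        (if hmp.contains (pvPopLoop i 0) = false then hmp.insert (pvPopLoop i 0) 0 else hmp).modify
          (pvPopLoop i 0) 0 (· + 1))
      PySem.Dict.empty
    = PySem.Dict.counter (pvPops n) := by
  rw [PySem.List.foldl_congr_mem _ _
      (fun d (i : Int) => d.modify ((PySem.Int.bitCount i : Nat) : Int) 0 (· + 1)) _ ?_]
  · rw [PySem.Dict.counter_eq_foldl]
    unfold pvPops
    rw [List.foldl_map]
  · intro acc x hx
    rw [PySem.List.mem_pyRange_one] at hx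
    have hx' : x = ((x.toNat : Nat) : Int) := by omega
    have hpl : pvPopLoop x 0 = ((PySem.Int.bitCount x : Nat) : Int) := by
      rw [hx', pvPopLoop_eq]
      simp
    rw [hpl, pvStep_eq]

def pvDot (xs ys : List Int) : Int := ((xs.zip ys).map (fun p => p.1 * p.2)).sum

def pvExpand (items : List (Int × Int)) : List Int :=
  items.flatMap (fun kv => List.replicate kv.2.toNat kv.1)

theorem pvFoldlDot (l : List (Int × Int)) : ∀ t : Int,
    l.foldl (fun a p => a + p.1 * p.2) t = t + (l.map (fun p => p.1 * p.2)).sum := by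
  induction l with
  | nil => simp
  | cons p l ih => intro t; simp [ih]; ring

theorem pvDotNilRight (xs : List Int) : pvDot xs [] = 0 := by
  simp [pvDot]

theorem pvDotD1 (xs : List Int) (i v : Nat) (key : Int) :
    pvDot (xs.drop i) (List.replicate (v+1) key)
      = PySem.List.pyGetD xs (i : Int) 0 * key + pvDot (xs.drop (i+1)) (List.replicate v key) := by
  by_cases h : i < xs.length
  · rw [List.drop_eq_getElem_cons h]
    have hg : PySem.List.pyGetD xs (i : Int) 0 = xs[i] := by
      rw [PySem.List.pyGetD_eq_getElem xs 0 (by omega) (by exact_mod_cast h)]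
      simp
    rw [hg]
    simp only [pvDot, List.replicate_succ, List.zip_cons_cons, List.map_cons, List.sum_cons]
  · have h1 : xs.drop i = [] := List.drop_eq_nil_of_le (by omega)
    have h2 : xs.drop (i+1) = [] := List.drop_eq_nil_of_le (by omega)
    have hg : PySem.List.pyGetD xs (i : Int) 0 = 0 := by
      simp [PySem.List.pyGetD, PySem.List.pyGet?, PySem.List.pyIdx?, h]
    rw [h1, h2, hg]
    simp [pvDot]

theorem pvDotD2 (ys : List Int) : ∀ (xs zs : List Int),
    pvDot xs (ys ++ zs) = pvDot xs ys + pvDot (xs.drop ys.length) zs := by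
  induction ys with
  | nil => intro xs zs; simp [pvDot]
  | cons y ys ih =>
    intro xs zs
    cases xs with
    | nil => simp [pvDot]
    | cons a l =>
      simp only [List.cons_append, pvDot, List.zip_cons_cons, List.map_cons, List.sum_cons,
        List.length_cons, List.drop_succ_cons]
      have := ih l zs
      simp only [pvDot] at this
      rw [this]
      ring

theorem pvAddLoop_eq (vals : List Int) (key : Int) : ∀ (v : Nat) (value t i : Int),
    value.toNat = v → 0 ≤ i →
    pvAddLoop vals key value t i
      = (t + pvDot (vals.drop i.toNat) (List.replicate value.toNat key), i + (value.toNat : Int)) := by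
  intro v
  induction v with
  | zero =>
    intro value t i hv hi
    rw [pvAddLoop, dif_neg (by omega)]
    rw [hv]
    simp [pvDotNilRight]
  | succ w ih =>
    intro value t i hv hi
    rw [pvAddLoop, dif_pos (by omega)]
    rw [ih (value - 1) _ _ (by omega) (by omega)]
    have h1 : (value - 1).toNat = w := by omega
    have h2 : (i + 1).toNat = i.toNat + 1 := by omega
    have h3 : PySem.List.pyGetD vals i 0 = PySem.List.pyGetD vals ((i.toNat : Nat) : Int) 0 := by
      congr 1
      omega
    rw [hv, h1, h2, h3, pvDotD1]
    simp only [Prod.mk.injEq]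
    refine ⟨by ring, by push_cast; ring⟩

theorem pvPhase2 (vals : List Int) (items : List (Int × Int)) : ∀ (t i : Int), 0 ≤ i →
    items.foldl (fun (ti : Int × Int) kv => pvAddLoop vals kv.1 kv.2 ti.1 ti.2) (t, i)
      = (t + pvDot (vals.drop i.toNat) (pvExpand items),
         i + (((items.map (fun kv => kv.2.toNat)).sum : Nat) : Int)) := by
  induction items with
  | nil => intro t i hi; simp [pvExpand, pvDotNilRight]
  | cons kv rest ih =>
    intro t i hi
    simp only [List.foldl_cons]
    rw [pvAddLoop_eq vals kv.1 kv.2.toNat kv.2 t i rfl hi]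
    rw [ih _ _ (by omega)]
    have hdrop : List.drop ((i + (kv.2.toNat : Int)).toNat) vals
        = List.drop (kv.2.toNat) (List.drop i.toNat vals) := by
      rw [List.drop_drop]; congr 1; omega
    rw [hdrop]
    simp only [pvExpand, List.flatMap_cons]
    rw [pvDotD2]
    simp only [List.length_replicate, List.map_cons, List.sum_cons, Prod.mk.injEq]
    refine ⟨by ring, by push_cast; ring⟩

theorem pvCountExpand (M : Nat) (f : Nat → Nat) (x : Int) :
    ((List.map (fun k : Nat => ((k : Int), ((f k : Nat) : Int))) (List.range' 1 M)).flatMap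
      (fun kv => List.replicate kv.2.toNat kv.1)).count x
    = if 1 ≤ x ∧ x ≤ (M : Int) then f x.toNat else 0 := by
  induction M with
  | zero =>
    simp only [List.range'_zero, List.map_nil, List.flatMap_nil, List.count_nil]
    split_ifs with h
    · exfalso; omega
    · rfl
  | succ j ih =>
    rw [List.range'_concat, List.map_append, List.flatMap_append, List.count_append, ih]
    have h11 : (1 + 1 * j : Nat) = j + 1 := by omega
    rw [h11]
    simp only [List.map_cons, List.map_nil, List.flatMap_cons, List.flatMap_nil,
      List.append_nil, List.count_replicate, Int.toNat_natCast]
    by_cases hx : x = ((j+1 : Nat) : Int)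
    · have hb : (((j+1 : Nat) : Int) == x) = true := by simp [hx]
      rw [hb]
      simp only [if_true]
      have h1 : ¬ (1 ≤ x ∧ x ≤ (j : Int)) := by omega
      have h2 : 1 ≤ x ∧ x ≤ ((j+1 : Nat) : Int) := by omega
      rw [if_neg h1, if_pos (by push_cast at h2 ⊢; exact_mod_cast h2)]
      have : x.toNat = j + 1 := by omega
      rw [this]
      omega
    · have hb : (((j+1 : Nat) : Int) == x) = false := by simp; omega
      rw [hb]
      simp only [Bool.false_eq_true, if_false, Nat.add_zero]
      have hiff : (1 ≤ x ∧ x ≤ (j : Int)) ↔ (1 ≤ x ∧ x ≤ ((j : Int) + 1)) := by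
        constructor <;> (intro h; push_cast at hx; omega)
      by_cases h : 1 ≤ x ∧ x ≤ (j : Int)
      · rw [if_pos h, if_pos (by push_cast; omega)]
      · rw [if_neg h, if_neg (by push_cast; push_cast at hx; omega)]

theorem pvPopsCount (n : Nat) (x : Int) (hx : ¬ (1 ≤ x ∧ x ≤ (pvM n : Int))) :
    (pvPops n).count x = 0 := by
  rw [List.count_eq_zero]
  intro hmem
  unfold pvPops at hmem
  obtain ⟨i, hi, he⟩ := List.mem_map.mp hmem
  rw [PySem.List.mem_pyRange_one] at hi
  have hi' : i = ((i.toNat : Nat) : Int) := by omega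
  rw [hi'] at he
  have h1 := pvBcPos i.toNat (by omega)
  have h2 := pvBcLe n i.toNat (by omega) (by omega)
  omega

theorem pvMemExpand (M : Nat) (f : Nat → Nat) (y : Int)
    (h : y ∈ (List.map (fun k : Nat => ((k : Int), ((f k : Nat) : Int))) (List.range' 1 M)).flatMap
      (fun kv => List.replicate kv.2.toNat kv.1)) : 1 ≤ y ∧ y ≤ (M : Int) := by
  obtain ⟨kv, hkv, hy⟩ := List.mem_flatMap.mp h
  obtain ⟨k, hk, he⟩ := List.mem_map.mp hkv
  rw [List.mem_range'_1] at hk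
  have := List.eq_of_mem_replicate hy
  subst he
  simp only at this
  omega

theorem pvPairwiseExpand (M : Nat) (f : Nat → Nat) :
    ((List.map (fun k : Nat => ((k : Int), ((f k : Nat) : Int))) (List.range' 1 M)).flatMap
      (fun kv => List.replicate kv.2.toNat kv.1)).Pairwise (· ≤ ·) := by
  induction M with
  | zero => simp
  | succ j ih =>
    rw [List.range'_concat, List.map_append, List.flatMap_append]
    rw [List.pairwise_append]
    refine ⟨ih, ?_, ?_⟩
    · simp only [List.map_cons, List.map_nil, List.flatMap_cons, List.flatMap_nil, List.append_nil]
      rw [List.pairwise_replicate]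
      right; exact le_refl _
    · intro a ha b hb
      have h1 := pvMemExpand j f a ha
      simp only [List.map_cons, List.map_nil, List.flatMap_cons, List.flatMap_nil,
        List.append_nil] at hb
      have := List.eq_of_mem_replicate hb
      subst this
      push_cast
      omega

theorem pvSortedExpand (n : Nat) :
    PySem.List.sorted (pvPops n) (fun x => x) false
      = (List.map (fun k : Nat => ((k : Int), (((pvPops n).count ((k : Nat) : Int) : Nat) : Int)))
          (List.range' 1 (pvM n))).flatMap (fun kv => List.replicate kv.2.toNat kv.1) := by
  apply PySem.List.sorted_id_eq_of_perm_of_pairwise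
  · rw [List.perm_iff_count]
    intro x
    rw [pvCountExpand (pvM n) (fun k => (pvPops n).count ((k : Nat) : Int)) x]
    by_cases h : 1 ≤ x ∧ x ≤ ((pvM n : Nat) : Int)
    · rw [if_pos h]
      congr 1
      omega
    · rw [if_neg h]
      exact (pvPopsCount n x h).symm
  · exact pvPairwiseExpand (pvM n) _

theorem pvMain (vals : List Int) : level_cost vals = level_cost_alt vals := by
  show (List.foldl (fun ti kv => pvAddLoop vals kv.1 kv.2 ti.1 ti.2) ((0 : Int), (0 : Int))
      (List.foldl
        (fun (hmp : PySem.Dict Int Int) i =>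
          (if hmp.contains (pvPopLoop i 0) = false then hmp.insert (pvPopLoop i 0) 0 else hmp).modify
            (pvPopLoop i 0) 0 (· + 1))
        PySem.Dict.empty (PySem.List.pyRange 1 ((vals.length : Int) + 1) 1)).items).1
    = List.foldl (fun acc vc => acc + vc.1 * vc.2) 0
        (vals.zip (PySem.List.sorted
          ((PySem.List.pyRange 1 ((vals.length : Int) + 1) 1).map (fun i => (PySem.Int.bitCount i : Int)))
          (fun x => x) false))
  rw [pvDict vals.length, PySem.Dict.items_counter, pvSet vals.length, List.map_map]
  rw [pvPhase2 vals _ 0 0 (le_refl 0)]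
  rw [pvFoldlDot]
  rw [show ((PySem.List.pyRange 1 ((vals.length : Int) + 1) 1).map
      (fun i => (PySem.Int.bitCount i : Int))) = pvPops vals.length from rfl]
  rw [pvSortedExpand vals.length]
  simp only [Int.toNat_zero, List.drop_zero, zero_add]
  show pvDot vals _ = pvDot vals _
  rfl

-- ===== VERDICT (by name: the statement is the Claim_ definition above) =====
theorem level_cost_spec : Claim_equal_level_cost := by
  intro vals _
  show level_cost vals = level_cost_alt vals
  exact pvMain vals
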